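-- pv_equiv track=rewrite | github.com/tudragon154203/product-video-matching | infra/pvm/sync_compose.py | filter_services
-- ===== SOURCE A (Python) =====
-- def filter_services(lines, target_services):
--     """
--     Filter docker-compose content to include only specified services.
--
--     Args:
--         lines (list): List of lines from the docker-compose file
--         target_services (list): List of service names to keep
--
--     Returns:
--         list: Filtered lines containing only the specified services
--     """
--     filtered_lines = []
--     current_service = None
--     service_indent = 0
--     in_services_section = False
--     skip_current_service = False
--
--     for line in lines:
--         stripped_line = line.strip()
--         line_indent = len(line) - len(line.lstrip())
--
--         # Check if we're in the services section
--         if stripped_line == 'services:':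
--             in_services_section = True
--             filtered_lines.append(line)
--             continue
--
--         # If we hit a top-level section after services, we're done with services
--         if in_services_section and line_indent == 0 and stripped_line and not stripped_line.startswith('#'):
--             in_services_section = False
--             filtered_lines.append(line)
--             continue
--
--         # If not in services section, include all lines
--         if not in_services_section:
--             filtered_lines.append(line)
--             continue
--
--         # In services section - check for service definitions
--         if line_indent == 2 and stripped_line.endswith(':') and not stripped_line.startswith('#'):
--             # This is a service definition
--             current_service = stripped_line[:-1]  # Remove the colon
--             service_indent = line_indent
--             skip_current_service = current_service not in target_services
--
--             if not skip_current_service: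
--                 filtered_lines.append(line)
--             continue
--
--         # Handle lines within a service
--         if current_service is not None:
--             # If this line has the same or less indentation than the service definition,
--             # we've moved to a new service or section
--             if line_indent <= service_indent and stripped_line and not stripped_line.startswith('#'):
--                 current_service = None
--                 skip_current_service = False
--                 # Process this line again as it might be a new service
--                 if stripped_line.endswith(':'):
--                     current_service = stripped_line[:-1]
--                     service_indent = line_indent
--                     skip_current_service = current_service not in target_services
--
--                 if not skip_current_service:
--                     filtered_lines.append(line)
--             else:
--                 # This line belongs to the current service
--                 if not skip_current_service:
--                     filtered_lines.append(line)
--         else: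
--             # Not in a specific service, include the line
--             filtered_lines.append(line)
--
--     return filtered_lines
-- ===== SOURCE B (Python) =====
-- def filter_services(lines, target_services):
--     # Segment-structured rewrite: the document is consumed as alternating
--     # segments — outside text (bulk-copied up to and including the next
--     # 'services:' header) and a services section parsed until a top-level
--     # line closes it — instead of one flat loop driven by boolean flags.
--     targets = set(target_services)
--     out = []
--     cur, si = None, 0
--     i, n = 0, len(lines)
--     while i < n:
--         # outside segment: find the next 'services:' header, bulk-copy
--         j = i
--         while j < n and lines[j].strip() != 'services:':
--             j += 1
--         if j == n:
--             out.extend(lines[i:])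
--             break
--         out.extend(lines[i:j + 1])
--         i = j + 1
--         # services-section segment: parse until a top-level line closes it
--         while i < n:
--             line = lines[i]
--             i += 1
--             s = line.strip()
--             li = len(line) - len(line.lstrip())
--             if s == 'services:':
--                 out.append(line)
--             elif li == 0 and s and not s.startswith('#'):
--                 out.append(line)
--                 break
--             elif li == 2 and s.endswith(':') and not s.startswith('#'):
--                 cur, si = s[:-1], li
--                 if cur in targets:
--                     out.append(line)
--             elif cur is None:
--                 out.append(line)
--             elif li <= si and s and not s.startswith('#'):
--                 if s.endswith(':'):
--                     cur, si = s[:-1], li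
--                     if cur in targets:
--                         out.append(line)
--                 else:
--                     cur = None
--                     out.append(line)
--             elif cur in targets:
--                 out.append(line)
--     return out
-- ===== Notes on version B (the rewrite author's own statement) =====
-- stated objective: alternative
-- what changed: B consumes the document as alternating segments -- an outside segment bulk-copied up to and including the next 'services:' header found by an index scan, then a services-section segment parsed by an inner loop until a top-level line closes it -- replacing A's single flat loop driven by in_services/skip boolean flags; the skip flag is gone (membership in a set of targets is tested where needed) and the 're-process this line' branch is restructured.
import Mathlib
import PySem

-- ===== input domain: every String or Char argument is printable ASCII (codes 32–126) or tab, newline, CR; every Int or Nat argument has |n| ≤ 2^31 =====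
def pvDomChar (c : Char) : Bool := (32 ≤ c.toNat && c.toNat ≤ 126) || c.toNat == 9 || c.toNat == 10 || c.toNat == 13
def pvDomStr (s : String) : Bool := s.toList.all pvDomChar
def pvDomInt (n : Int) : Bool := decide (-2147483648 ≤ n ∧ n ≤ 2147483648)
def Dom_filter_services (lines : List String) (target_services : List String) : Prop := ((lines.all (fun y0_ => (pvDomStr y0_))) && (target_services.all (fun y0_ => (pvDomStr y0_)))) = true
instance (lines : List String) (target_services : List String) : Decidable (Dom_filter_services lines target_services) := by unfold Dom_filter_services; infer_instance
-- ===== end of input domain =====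

-- B consumes the document as alternating segments (bulk-copied outside text up to the next 'services:' header,
-- then a services section parsed until a top-level line closes it) instead of A's flat flag-driven loop (objective: alternative decomposition).


-- ===== PORT A =====
-- A's single loop; state = (filtered, current_service, service_indent, in_services_section, skip_current_service)
def pvA_loop (ts : List String) : List String → List String → Option String → Int → Bool → Bool → List String
  | [], filtered, _, _, _, _ => filtered
  | line :: rest, filtered, cs, si, insec, skip =>
    let s := PySem.Str.strip line
    let li := PySem.Str.len line - PySem.Str.len (PySem.Str.lstrip line)
    if s = "services:" then
      pvA_loop ts rest (filtered ++ [line]) cs si true skip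
    else if insec && li == 0 && !(s = "") && !(PySem.Str.startswith s "#") then
      pvA_loop ts rest (filtered ++ [line]) cs si false skip
    else if !insec then
      pvA_loop ts rest (filtered ++ [line]) cs si insec skip
    else if li == 2 && PySem.Str.endswith s ":" && !(PySem.Str.startswith s "#") then
      let c := PySem.Str.slice s none (some (-1))
      let skip' := !(ts.contains c)
      pvA_loop ts rest (if !skip' then filtered ++ [line] else filtered) (some c) li insec skip'
    else
      match cs with
      | some _ =>
        if li ≤ si && !(s = "") && !(PySem.Str.startswith s "#") then
          if PySem.Str.endswith s ":" then
            let c := PySem.Str.slice s none (some (-1))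
            let skip' := !(ts.contains c)
            pvA_loop ts rest (if !skip' then filtered ++ [line] else filtered) (some c) li insec skip'
          else
            pvA_loop ts rest (filtered ++ [line]) none si insec false
        else
          pvA_loop ts rest (if !skip then filtered ++ [line] else filtered) cs si insec skip
      | none => pvA_loop ts rest (filtered ++ [line]) cs si insec skip

def filter_services (lines : List String) (target_services : List String) : List String :=
  pvA_loop target_services lines [] none 0 false false

-- ===== PORT B =====
-- B's inner services-section loop: parses lines until a top-level line closes the section (the break);
-- returns (emitted lines, remaining lines after the break, current service, its indent)
def pvB_section (ts : PySem.Set String) : List String → Option String → Int →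
    List String × List String × Option String × Int
  | [], cur, si => ([], [], cur, si)
  | line :: rest, cur, si =>
    let s := PySem.Str.strip line
    let li := PySem.Str.len line - PySem.Str.len (PySem.Str.lstrip line)
    if s = "services:" then
      let r := pvB_section ts rest cur si
      (line :: r.1, r.2)
    else if li == 0 && !(s = "") && !(PySem.Str.startswith s "#") then
      ([line], rest, cur, si)
    else if li == 2 && PySem.Str.endswith s ":" && !(PySem.Str.startswith s "#") then
      let c := PySem.Str.slice s none (some (-1))
      let r := pvB_section ts rest (some c) li
      (if PySem.Set.contains ts c then line :: r.1 else r.1, r.2)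
    else
      match cur with
      | none =>
        let r := pvB_section ts rest none si
        (line :: r.1, r.2)
      | some c0 =>
        if li ≤ si && !(s = "") && !(PySem.Str.startswith s "#") then
          if PySem.Str.endswith s ":" then
            let c := PySem.Str.slice s none (some (-1))
            let r := pvB_section ts rest (some c) li
            (if PySem.Set.contains ts c then line :: r.1 else r.1, r.2)
          else
            let r := pvB_section ts rest none si
            (line :: r.1, r.2)
        else
          let r := pvB_section ts rest cur si
          (if PySem.Set.contains ts c0 then line :: r.1 else r.1, r.2)

-- the remaining lines returned by the section parser are a suffix-part of its input (needed for pvB_outer's termination)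
lemma pvB_section_rest_le (ts : PySem.Set String) :
    ∀ (ls : List String) (cur : Option String) (si : Int),
      (pvB_section ts ls cur si).2.1.length ≤ ls.length := by
  intro ls
  induction ls with
  | nil => intro cur si; simp [pvB_section]
  | cons line rest ih =>
    intro cur si
    simp only [pvB_section]
    split_ifs <;> (try cases cur) <;> simp <;>
      exact Nat.le_succ_of_le (ih _ _)

-- B's outer loop: alternates bulk-copied outside segments (up to and including the next
-- 'services:' header, found by a forward scan = List.span) with parsed section segments
def pvB_outer (ts : PySem.Set String) (ls : List String) (cur : Option String) (si : Int) :
    List String :=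
  if hrem : ls.dropWhile (fun l => !(PySem.Str.strip l == "services:")) = [] then
    ls.takeWhile (fun l => !(PySem.Str.strip l == "services:"))
  else
    let r := pvB_section ts (ls.dropWhile (fun l => !(PySem.Str.strip l == "services:"))).tail cur si
    ls.takeWhile (fun l => !(PySem.Str.strip l == "services:")) ++
      (ls.dropWhile (fun l => !(PySem.Str.strip l == "services:"))).head hrem ::
        (r.1 ++ pvB_outer ts r.2.1 r.2.2.1 r.2.2.2)
termination_by ls.length
decreasing_by
  have h2 := pvB_section_rest_le ts
    (ls.dropWhile (fun l => !(PySem.Str.strip l == "services:"))).tail cur si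
  have h3 : (ls.dropWhile (fun l => !(PySem.Str.strip l == "services:"))).length ≤ ls.length :=
    List.length_dropWhile_le _ _
  have h4 : 0 < (ls.dropWhile (fun l => !(PySem.Str.strip l == "services:"))).length :=
    List.length_pos_iff.mpr hrem
  have h5 := List.length_tail (l := ls.dropWhile (fun l => !(PySem.Str.strip l == "services:")))
  omega

def filter_services_alt (lines : List String) (target_services : List String) : List String :=
  pvB_outer (PySem.Set.ofList target_services) lines none 0

-- ===== PRECONDITION & SPEC =====
def Spec_filter_services (lines : List String) (target_services : List String) (out : List String) : Prop := out = filter_services_alt lines target_services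
instance (lines : List String) (target_services : List String) (out : List String) : Decidable (Spec_filter_services lines target_services out) := by unfold Spec_filter_services; infer_instance

-- ===== CLAIM (what is proved, stated in full; the proofs are below) =====
def Claim_equal_filter_services : Prop := ∀ (lines : List String) (target_services : List String), Dom_filter_services lines target_services → Spec_filter_services lines target_services (filter_services lines target_services)

-- ===== LEMMAS AND PROOFS =====

-- A's skip_current_service is always this function of current_service
def pvSkipOf (ts : List String) : Option String → Bool
  | none => false
  | some c => !(ts.contains c)

lemma pvContains (ts : List String) (c : String) :
    PySem.Set.contains (PySem.Set.ofList ts) c = ts.contains c := by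
  by_cases h : c ∈ ts
  · simp [PySem.Set.mem_ofList, h]
  · simp only [List.contains_eq_mem]
    rw [Bool.eq_iff_iff]
    simp [PySem.Set.mem_ofList, h]

-- in the services section, A's loop emits exactly the section parser's output and then
-- resumes outside the section on the parser's leftover lines and state
lemma pvSect (ts : List String) :
    ∀ (ls : List String) (filtered : List String) (cur : Option String) (si : Int),
      pvA_loop ts ls filtered cur si true (pvSkipOf ts cur) =
        pvA_loop ts (pvB_section (PySem.Set.ofList ts) ls cur si).2.1
          (filtered ++ (pvB_section (PySem.Set.ofList ts) ls cur si).1)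
          (pvB_section (PySem.Set.ofList ts) ls cur si).2.2.1
          (pvB_section (PySem.Set.ofList ts) ls cur si).2.2.2
          false
          (pvSkipOf ts (pvB_section (PySem.Set.ofList ts) ls cur si).2.2.1) := by
  intro ls
  induction ls with
  | nil => intro filtered cur si; simp [pvB_section, pvA_loop]
  | cons line rest ih =>
    intro filtered cur si
    simp only [pvA_loop, pvB_section]
    set s := PySem.Str.strip line with hs
    set li := PySem.Str.len line - PySem.Str.len (PySem.Str.lstrip line) with hli
    by_cases h1 : s = "services:"
    · simp only [h1, if_true]
      rw [ih (filtered ++ [line]) cur si]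
      simp
    · simp only [if_neg h1]
      by_cases h2 : (li == 0 && !(s = "") && !(PySem.Str.startswith s "#")) = true
      · have h2' : (true && li == 0 && !(s = "") && !(PySem.Str.startswith s "#")) = true := by
          simpa using h2
        simp only [h2, h2', if_true]
      · simp only [Bool.not_eq_true] at h2
        have h2' : (true && li == 0 && !(s = "") && !(PySem.Str.startswith s "#")) = false := by
          simpa using h2
        simp only [h2, h2', Bool.false_eq_true, if_false, Bool.not_true]
        · by_cases h4 : (li == 2 && PySem.Str.endswith s ":" && !(PySem.Str.startswith s "#")) = true
          · simp only [h4, if_true]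
            set c := PySem.Str.slice s none (some (-1)) with hc
            have hrec := ih (if !(!(ts.contains c)) then filtered ++ [line] else filtered) (some c) li
            simp only [pvSkipOf] at hrec ⊢
            rw [hrec, pvContains]
            by_cases hm : c ∈ ts <;> simp [hm]
          · simp only [Bool.not_eq_true] at h4
            simp only [h4, Bool.false_eq_true, if_false]
            cases cur with
            | none =>
              have hrec := ih (filtered ++ [line]) none si
              simp only [pvSkipOf] at hrec ⊢
              rw [hrec]
              simp
            | some c0 =>
              by_cases h5 : (li ≤ si && !(s = "") && !(PySem.Str.startswith s "#")) = true
              · simp only [h5, if_true]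
                by_cases h6 : PySem.Str.endswith s ":" = true
                · simp only [h6, if_true]
                  set c := PySem.Str.slice s none (some (-1)) with hc
                  have hrec := ih (if !(!(ts.contains c)) then filtered ++ [line] else filtered) (some c) li
                  simp only [pvSkipOf] at hrec ⊢
                  rw [hrec, pvContains]
                  by_cases hm : c ∈ ts <;> simp [hm]
                · simp only [Bool.not_eq_true] at h6
                  simp only [h6, Bool.false_eq_true, if_false]
                  have hrec := ih (filtered ++ [line]) none si
                  simp only [pvSkipOf] at hrec ⊢
                  rw [hrec]
                  simp
              · simp only [Bool.not_eq_true] at h5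
                simp only [h5, Bool.false_eq_true, if_false]
                have hrec := ih (if !(pvSkipOf ts (some c0)) then filtered ++ [line] else filtered) (some c0) si
                simp only [pvSkipOf] at hrec ⊢
                rw [hrec, pvContains]
                by_cases hm : c0 ∈ ts <;> simp [hm]

-- unfolding pvB_outer on a non-header head line
lemma pvB_outer_cons_ne (ts : PySem.Set String) (line : String) (rest : List String)
    (cur : Option String) (si : Int) (h : ¬ (PySem.Str.strip line = "services:")) :
    pvB_outer ts (line :: rest) cur si = line :: pvB_outer ts rest cur si := by
  rw [pvB_outer.eq_def, pvB_outer.eq_def]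
  have hp : (fun l => !(PySem.Str.strip l == "services:")) line = true := by
    simp [h]
  simp only [List.takeWhile_cons, List.dropWhile_cons, hp, if_true]
  split <;> simp

-- unfolding pvB_outer on a header head line
lemma pvB_outer_cons_hdr (ts : PySem.Set String) (line : String) (rest : List String)
    (cur : Option String) (si : Int) (h : PySem.Str.strip line = "services:") :
    pvB_outer ts (line :: rest) cur si =
      line :: ((pvB_section ts rest cur si).1 ++
        pvB_outer ts (pvB_section ts rest cur si).2.1
          (pvB_section ts rest cur si).2.2.1 (pvB_section ts rest cur si).2.2.2) := by
  rw [pvB_outer.eq_def]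
  have hp : (fun l => !(PySem.Str.strip l == "services:")) line = false := by
    simp [h]
  simp only [List.takeWhile_cons, List.dropWhile_cons, hp, Bool.false_eq_true, if_false]
  simp

lemma pvB_outer_nil (ts : PySem.Set String) (cur : Option String) (si : Int) :
    pvB_outer ts [] cur si = [] := by
  rw [pvB_outer.eq_def]; simp

-- outside the services section, A's loop emits B's outer-loop output
lemma pvMain (ts : List String) :
    ∀ (n : Nat) (ls : List String), ls.length ≤ n →
      ∀ (filtered : List String) (cur : Option String) (si : Int),
        pvA_loop ts ls filtered cur si false (pvSkipOf ts cur) =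
          filtered ++ pvB_outer (PySem.Set.ofList ts) ls cur si := by
  intro n
  induction n with
  | zero =>
    intro ls hl filtered cur si
    have : ls = [] := List.length_eq_zero_iff.mp (Nat.le_zero.mp hl)
    subst this
    simp [pvA_loop, pvB_outer_nil]
  | succ n ih =>
    intro ls hl filtered cur si
    cases ls with
    | nil => simp [pvA_loop, pvB_outer_nil]
    | cons line rest =>
      simp only [List.length_cons, Nat.succ_le_succ_iff] at hl
      by_cases h1 : PySem.Str.strip line = "services:"
      · rw [pvB_outer_cons_hdr _ _ _ _ _ h1]
        simp only [pvA_loop, h1, if_true]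
        rw [pvSect ts rest (filtered ++ [line]) cur si]
        rw [ih _ (le_trans (pvB_section_rest_le _ rest cur si) hl)]
        simp
      · rw [pvB_outer_cons_ne _ _ _ _ _ h1]
        simp only [pvA_loop, if_neg h1]
        have h2 : (false && (PySem.Str.len line - PySem.Str.len (PySem.Str.lstrip line) == 0)
            && !(PySem.Str.strip line = "") && !(PySem.Str.startswith (PySem.Str.strip line) "#")) = false := by
          simp
        simp only [h2, Bool.false_eq_true, if_false, Bool.not_false, if_true]
        rw [ih rest hl (filtered ++ [line]) cur si]
        simp

-- ===== VERDICT (by name: the statement is the Claim_ definition above) =====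
theorem filter_services_spec : Claim_equal_filter_services := by
  intro lines ts _
  unfold Spec_filter_services filter_services filter_services_alt
  have := pvMain ts lines.length lines le_rfl [] none 0
  simpa [pvSkipOf] using this
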